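-- pv_equiv track=rewrite | github.com/Ackrome/FU | Course_1/pitonchick/gbkln.py | clear2
-- ===== SOURCE A (Python) =====
-- def is_equal(lst, pattern):
--     if len(lst) != len(pattern):
--         return False
--     for a, b in zip(lst, pattern):
--         if a != b:
--             return False
--     return True
--
-- def clear2(lst, pattern):
--     res = []
--     l = len(pattern)
--     r = iter(range(len(lst)))
--     while True:
--         try:
--             i = next(r)
--             if is_equal(lst[i:i+l], pattern):
--                 for j in range(i, i + l - 1):
--                     next(r)
--             else:
--                 res.append(lst[i])
--         except StopIteration:
--             break
--     return res
-- ===== SOURCE B (Python) =====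
-- def _find(lst, pattern, start):
--     # index of the first occurrence of pattern at or after start, else len(lst)
--     n = len(lst)
--     l = len(pattern)
--     for j in range(start, n - l + 1):
--         if lst[j:j+l] == pattern:
--             return j
--     return n
--
-- def clear2(lst, pattern):
--     l = len(pattern)
--     n = len(lst)
--     if l == 0:
--         return list(lst)
--     res = []
--     i = 0
--     while i < n:
--         j = _find(lst, pattern, i)
--         res.extend(lst[i:j])
--         i = j + l if j < n else n
--     return res
-- ===== Notes on version B (the rewrite author's own statement) =====
-- stated objective: alternative
-- what changed: Replaces A's per-index iterator walk (try/except over an iterator, element-wise is_equal helper, manual iterator consumption to skip) by a find-next-occurrence-and-copy-segment loop: repeatedly locate the next pattern occurrence and extend the result with the whole untouched segment at once; the empty-pattern corner is fixed to remove nothing.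
-- intended difference: On an empty pattern with a nonempty list A returns [] (the empty slice 'matches' at every index so every element is silently dropped), while B returns the list unchanged, the intended result of removing zero-length occurrences. — e.g. on clear2([1], []): A returns [], B returns [1]
import Mathlib
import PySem

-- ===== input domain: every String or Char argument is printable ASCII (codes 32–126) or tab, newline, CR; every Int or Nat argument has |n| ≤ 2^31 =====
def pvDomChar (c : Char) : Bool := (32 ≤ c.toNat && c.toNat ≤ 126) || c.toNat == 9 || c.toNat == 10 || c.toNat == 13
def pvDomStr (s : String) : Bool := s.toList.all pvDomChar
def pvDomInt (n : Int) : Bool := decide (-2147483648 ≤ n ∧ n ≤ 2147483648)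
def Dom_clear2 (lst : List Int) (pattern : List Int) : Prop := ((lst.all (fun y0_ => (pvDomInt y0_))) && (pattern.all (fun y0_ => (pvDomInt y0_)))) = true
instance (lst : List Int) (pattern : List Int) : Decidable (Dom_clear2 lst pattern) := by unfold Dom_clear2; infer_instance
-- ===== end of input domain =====

-- B replaces A's per-index iterator walk by a find-next-occurrence / copy-segment loop (alternative
-- decomposition, same cost); on an empty pattern B removes nothing where A drops everything (D_ below).

-- ===== PORT A =====
-- helper is_equal: the 'for a, b in zip(...)' loop
def isEqualZip : List (Int × Int) → Bool
  | [] => true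
  | (a, b) :: t => if a ≠ b then false else isEqualZip t

def is_equal (lst : List Int) (pattern : List Int) : Bool :=
  if lst.length ≠ pattern.length then false else isEqualZip (lst.zip pattern)

-- the while-True loop: the iterator r holds the not-yet-consumed indices; a match consumes l-1 more
-- (StopIteration inside the skip 'for' breaks the loop, which List.drop reproduces by yielding [])
def clear2Loop (lst : List Int) (pattern : List Int) (l : Nat) :
    List Nat → List Int → List Int
  | [], res => res
  | i :: r, res =>
    if is_equal (PySem.List.slice lst (some (i : Int)) (some ((i : Int) + (l : Int)))) pattern then
      clear2Loop lst pattern l (r.drop (l - 1)) res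
    else
      clear2Loop lst pattern l r (res ++ [(PySem.List.pyGet? lst (i : Int)).getD 0])
  termination_by idxs _ => idxs.length
  decreasing_by
  · simp only [List.length_cons, List.length_drop]
    omega
  · simp

def clear2 (lst : List Int) (pattern : List Int) : List Int :=
  clear2Loop lst pattern pattern.length (List.range lst.length) []

-- ===== PORT B =====
-- _find's 'for j in range(start, n - l + 1)' loop body
def find2Loop (lst : List Int) (pattern : List Int) (l : Nat) : List Nat → Nat
  | [] => lst.length
  | j :: r =>
    if PySem.List.slice lst (some (j : Int)) (some ((j : Int) + (l : Int))) = pattern then j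
    else find2Loop lst pattern l r

-- _find: Python range(start, n - l + 1) has max(0, n - l + 1 - start) elements (Int arithmetic)
def find2 (lst : List Int) (pattern : List Int) (start : Nat) : Nat :=
  find2Loop lst pattern pattern.length
    (List.range' start ((((lst.length : Int) - (pattern.length : Int) + 1) - (start : Int)).toNat))

-- termination helper for the while loop: _find never returns an index below start
theorem le_find2Loop (lst pattern : List Int) (l : Nat) (s : Nat) :
    ∀ ks : List Nat, (∀ k ∈ ks, s ≤ k) → s ≤ lst.length → s ≤ find2Loop lst pattern l ks := by
  intro ks
  induction ks with
  | nil => intro _ h; simpa [find2Loop] using h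
  | cons k t ih =>
    intro hk hs
    simp only [find2Loop]
    split
    · exact hk k (by simp)
    · exact ih (fun x hx => hk x (by simp [hx])) hs

theorem le_find2 (lst pattern : List Int) (start : Nat) (h : start ≤ lst.length) :
    start ≤ find2 lst pattern start := by
  refine le_find2Loop lst pattern pattern.length start _ ?_ h
  intro k hk
  exact (List.mem_range'_1.mp hk).1

-- B's 'while i < n' loop; hl (pattern nonempty) is B's l == 0 guard, needed for termination
def clear2AltLoop (lst : List Int) (pattern : List Int) (l n : Nat) (hl : 0 < l)
    (hn : n = lst.length) (i : Nat) (res : List Int) : List Int :=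
  if h : i < n then
    let j := find2 lst pattern i
    let res' := res ++ PySem.List.slice lst (some (i : Int)) (some (j : Int))
    if hj : j < n then clear2AltLoop lst pattern l n hl hn (j + l) res'
    else clear2AltLoop lst pattern l n hl hn n res'
  else res
  termination_by n - i
  decreasing_by
  · have hij : i ≤ find2 lst pattern i := le_find2 lst pattern i (by omega)
    omega
  · omega

def clear2_alt (lst : List Int) (pattern : List Int) : List Int :=
  if h : pattern.length = 0 then lst
  else clear2AltLoop lst pattern pattern.length lst.length (Nat.pos_of_ne_zero h) rfl 0 []

-- ===== PRECONDITION & SPEC =====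
-- On an empty pattern with nonempty lst, A returns [] (the empty slice 'matches' at every index so
-- every element is dropped); B returns lst unchanged, the intended result of removing zero-length
-- occurrences.
def D_clear2 (lst : List Int) (pattern : List Int) : Prop := pattern = [] ∧ lst ≠ []
instance (lst : List Int) (pattern : List Int) : Decidable (D_clear2 lst pattern) := by
  unfold D_clear2; infer_instance

def Spec_clear2 (lst : List Int) (pattern : List Int) (out : List Int) : Prop :=
  ¬ D_clear2 lst pattern → out = clear2_alt lst pattern
instance (lst : List Int) (pattern : List Int) (out : List Int) : Decidable (Spec_clear2 lst pattern out) := by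
  unfold Spec_clear2; infer_instance

def pvDiffWitness_clear2 : List Int × List Int := ([1], [])
def pvDiffWitnessOut_clear2 : (List Int) × (List Int) := ([], [1])

-- ===== CLAIM (what is proved, stated in full; the proofs are below) =====
def Claim_unchanged_clear2 : Prop :=
  ∀ (lst : List Int) (pattern : List Int), Dom_clear2 lst pattern → Spec_clear2 lst pattern (clear2 lst pattern)
def Claim_changed_clear2 : Prop :=
  Dom_clear2 (pvDiffWitness_clear2.1) (pvDiffWitness_clear2.2) ∧
  D_clear2 (pvDiffWitness_clear2.1) (pvDiffWitness_clear2.2) ∧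
  clear2 (pvDiffWitness_clear2.1) (pvDiffWitness_clear2.2) = pvDiffWitnessOut_clear2.1 ∧
  clear2_alt (pvDiffWitness_clear2.1) (pvDiffWitness_clear2.2) = pvDiffWitnessOut_clear2.2 ∧
  pvDiffWitnessOut_clear2.1 ≠ pvDiffWitnessOut_clear2.2
def Claim_exact_clear2 : Prop :=
  ∀ (lst : List Int) (pattern : List Int), Dom_clear2 lst pattern → D_clear2 lst pattern →
    clear2 lst pattern ≠ clear2_alt lst pattern

-- ===== LEMMAS AND PROOFS =====

-- the common greedy left-to-right removal both programs compute (for a nonempty pattern)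
def greedy (pattern : List Int) (hl : 0 < pattern.length) : List Int → List Int
  | [] => []
  | x :: t =>
    if (x :: t).take pattern.length = pattern then greedy pattern hl (t.drop (pattern.length - 1))
    else x :: greedy pattern hl t
  termination_by xs => xs.length
  decreasing_by
  · simp only [List.length_cons, List.length_drop]
    omega
  · simp

theorem isEqualZip_iff :
    ∀ (xs ys : List Int), xs.length = ys.length → (isEqualZip (xs.zip ys) = true ↔ xs = ys) := by
  intro xs
  induction xs with
  | nil => intro ys h; cases ys <;> simp_all [isEqualZip]
  | cons a t ih =>
    intro ys h
    cases ys with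
    | nil => simp at h
    | cons b u =>
      simp only [List.zip_cons_cons, isEqualZip]
      constructor
      · intro hz
        by_cases hab : a = b
        · subst hab
          simp only [ne_eq, not_true_eq_false, if_false] at hz
          have := (ih u (by simpa using h)).mp (by simpa using hz)
          simp [this]
        · simp [hab] at hz
      · intro he
        cases he
        simp only [ne_eq, not_true_eq_false, if_false]
        exact (ih t (by simp)).mpr rfl

theorem is_equal_iff (xs ys : List Int) : is_equal xs ys = true ↔ xs = ys := by
  unfold is_equal
  split
  · rename_i h
    constructor
    · intro hf; simp at hf
    · intro he; exact absurd (congrArg List.length he) h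
  · rename_i h
    exact isEqualZip_iff xs ys (by omega)

-- A-side: for the empty pattern the loop matches everywhere and appends nothing
theorem clear2Loop_nil (lst : List Int) :
    ∀ idxs res, clear2Loop lst [] 0 idxs res = res := by
  intro idxs
  induction idxs with
  | nil => intro res; simp [clear2Loop]
  | cons i r ih =>
    intro res
    rw [clear2Loop]
    have hsl : PySem.List.slice lst (some (i : Int)) (some ((i : Int) + ((0 : Nat) : Int))) = [] := by
      simpa using PySem.List.slice_natCast_add lst i 0
    simp only [List.length_nil, hsl]
    have : is_equal ([] : List Int) [] = true := by decide
    rw [this]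
    simpa using ih res

theorem range'_drop (s n i : Nat) : (List.range' s n).drop i = List.range' (s + i) (n - i) := by
  induction n generalizing s i with
  | zero => simp
  | succ n ih =>
    cases i with
    | zero => simp
    | succ i =>
      rw [List.range'_succ]
      simp only [List.drop_succ_cons]
      rw [ih (s + 1) i]
      congr 1 <;> omega

theorem clear2Loop_eq_greedy (lst pattern : List Int) (hl : 0 < pattern.length) :
    ∀ m i res, i + m = lst.length →
      clear2Loop lst pattern pattern.length (List.range' i m) res =
        res ++ greedy pattern hl (lst.drop i) := by
  intro m
  induction m using Nat.strong_induction_on with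
  | _ m ih =>
    intro i res hlen
    match m with
    | 0 =>
      have hi : lst.length ≤ i := by omega
      simp [clear2Loop, List.drop_of_length_le hi, greedy]
    | Nat.succ k =>
      rw [List.range'_succ, clear2Loop, PySem.List.slice_natCast_add]
      have hi : i < lst.length := by omega
      have hdropcons : lst.drop i = lst[i] :: lst.drop (i + 1) := List.drop_eq_getElem_cons hi
      by_cases hm : (lst.drop i).take pattern.length = pattern
      · rw [(is_equal_iff _ _).mpr hm]
        simp only [if_true]
        have hLlen : pattern.length ≤ lst.length - i := by
          have := congrArg List.length hm
          simp [List.length_take, List.length_drop] at this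
          omega
        rw [range'_drop]
        have hrec := ih (k - (pattern.length - 1)) (by omega) (i + 1 + (pattern.length - 1)) res
          (by omega)
        rw [hrec]
        congr 1
        rw [hdropcons, greedy]
        rw [hdropcons] at hm
        rw [if_pos hm, List.drop_drop]
      · rw [show is_equal ((lst.drop i).take pattern.length) pattern = false by
          cases h : is_equal ((lst.drop i).take pattern.length) pattern
          · rfl
          · exact absurd ((is_equal_iff _ _).mp h) hm]
        simp only [Bool.false_eq_true, if_false]
        rw [ih k (by omega) (i + 1) _ (by omega)]
        rw [hdropcons, greedy]
        rw [hdropcons] at hm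
        rw [if_neg hm]
        have hget : (PySem.List.pyGet? lst (i : Int)).getD 0 = lst[i] := by
          rw [PySem.List.pyGet?_natCast, List.getElem?_eq_getElem hi]
          rfl
        rw [hget, List.append_assoc]
        rfl

theorem clear2_eq_greedy (lst pattern : List Int) (hl : 0 < pattern.length) :
    clear2 lst pattern = greedy pattern hl lst := by
  unfold clear2
  rw [List.range_eq_range']
  simpa using clear2Loop_eq_greedy lst pattern hl lst.length 0 [] (by omega)

-- B-side: characterisation of _find and the segment/skip structure of greedy
def matchAt (lst pattern : List Int) (k : Nat) : Prop :=
  (lst.drop k).take pattern.length = pattern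

theorem matchAt_bound {lst pattern : List Int} {k : Nat} (hl : 0 < pattern.length)
    (h : matchAt lst pattern k) : k + pattern.length ≤ lst.length := by
  have h0 := congrArg List.length h
  rw [List.length_take, List.length_drop] at h0
  have h1 : pattern.length ≤ lst.length - k := by
    conv_lhs => rw [← h0]
    exact min_le_right _ _
  omega

theorem find2Loop_spec (lst pattern : List Int) :
    ∀ m s,
      (find2Loop lst pattern pattern.length (List.range' s m) = lst.length ∧
        ∀ k, s ≤ k → k < s + m → ¬ matchAt lst pattern k) ∨
      (s ≤ find2Loop lst pattern pattern.length (List.range' s m) ∧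
        find2Loop lst pattern pattern.length (List.range' s m) < s + m ∧
        matchAt lst pattern (find2Loop lst pattern pattern.length (List.range' s m)) ∧
        ∀ k, s ≤ k → k < find2Loop lst pattern pattern.length (List.range' s m) →
          ¬ matchAt lst pattern k) := by
  intro m
  induction m with
  | zero =>
    intro s
    left
    constructor
    · simp [find2Loop]
    · intro k h1 h2; omega
  | succ n ih =>
    intro s
    rw [List.range'_succ, find2Loop, PySem.List.slice_natCast_add]
    by_cases hs : (lst.drop s).take pattern.length = pattern
    · right
      rw [if_pos hs]
      exact ⟨le_refl s, by omega, hs, fun k h1 h2 => by omega⟩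
    · rw [if_neg hs]
      rcases ih (s + 1) with ⟨heq, hno⟩ | ⟨h1, h2, h3, h4⟩
      · left
        refine ⟨heq, fun k hk1 hk2 hm => ?_⟩
        rcases Nat.eq_or_lt_of_le hk1 with rfl | hk
        · exact hs hm
        · exact hno k (by omega) (by omega) hm
      · right
        refine ⟨by omega, by omega, h3, fun k hk1 hk2 hm => ?_⟩
        rcases Nat.eq_or_lt_of_le hk1 with rfl | hk
        · exact hs hm
        · exact h4 k (by omega) hk2 hm

theorem find2_spec (lst pattern : List Int) (hl : 0 < pattern.length) (i : Nat)
    (hi : i ≤ lst.length) :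
    i ≤ find2 lst pattern i ∧ find2 lst pattern i ≤ lst.length ∧
      (∀ k, i ≤ k → k < find2 lst pattern i → ¬ matchAt lst pattern k) ∧
      (find2 lst pattern i < lst.length → matchAt lst pattern (find2 lst pattern i)) := by
  unfold find2
  set m := ((((lst.length : Int) - (pattern.length : Int) + 1) - (i : Int)).toNat) with hm
  rcases find2Loop_spec lst pattern m i with ⟨heq, hno⟩ | ⟨h1, h2, h3, h4⟩
  · rw [heq]
    refine ⟨hi, le_refl _, fun k hk1 hk2 hmat => ?_, fun h => by omega⟩
    have hb := matchAt_bound hl hmat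
    by_cases hk : k < i + m
    · exact hno k hk1 hk hmat
    · omega
  · have hb := matchAt_bound hl h3
    exact ⟨h1, by omega, h4, fun _ => h3⟩

theorem greedy_seg (lst pattern : List Int) (hl : 0 < pattern.length) :
    ∀ d i j, j - i = d → i ≤ j → j ≤ lst.length →
      (∀ k, i ≤ k → k < j → ¬ matchAt lst pattern k) →
      greedy pattern hl (lst.drop i) =
        (lst.drop i).take (j - i) ++ greedy pattern hl (lst.drop j) := by
  intro d
  induction d with
  | zero =>
    intro i j h1 h2 _ _
    have : i = j := by omega
    subst this
    simp
  | succ n ih =>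
    intro i j h1 h2 h3 hno
    have hi : i < lst.length := by omega
    have hdropcons : lst.drop i = lst[i] :: lst.drop (i + 1) := List.drop_eq_getElem_cons hi
    have hnm : ¬ ((lst.drop i).take pattern.length = pattern) := hno i (le_refl i) (by omega)
    rw [hdropcons, greedy]
    rw [hdropcons] at hnm
    rw [if_neg hnm]
    rw [ih (i + 1) j (by omega) (by omega) h3 (fun k hk1 hk2 => hno k (by omega) hk2)]
    rw [show j - i = (j - (i + 1)) + 1 by omega, List.take_succ_cons]
    rfl

theorem greedy_skip (lst pattern : List Int) (hl : 0 < pattern.length) (j : Nat)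
    (hj : j < lst.length) (h : matchAt lst pattern j) :
    greedy pattern hl (lst.drop j) = greedy pattern hl (lst.drop (j + pattern.length)) := by
  have hdropcons : lst.drop j = lst[j] :: lst.drop (j + 1) := List.drop_eq_getElem_cons hj
  unfold matchAt at h
  rw [hdropcons, greedy]
  rw [hdropcons] at h
  rw [if_pos h, List.drop_drop]
  congr 2 <;> omega

theorem altLoop_eq (lst pattern : List Int) (hl : 0 < pattern.length) :
    ∀ d i res, lst.length - i = d → i ≤ lst.length →
      clear2AltLoop lst pattern pattern.length lst.length hl rfl i res =
        res ++ greedy pattern hl (lst.drop i) := by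
  intro d
  induction d using Nat.strong_induction_on with
  | _ d ih =>
    intro i res hd hi
    rw [clear2AltLoop]
    by_cases h : i < lst.length
    · rw [dif_pos h]
      obtain ⟨hj1, hj2, hjno, hjmat⟩ := find2_spec lst pattern hl i hi
      set j := find2 lst pattern i with hjdef
      have hslice : PySem.List.slice lst (some (i : Int)) (some (j : Int)) =
          (lst.drop i).take (j - i) := PySem.List.slice_natCast lst i j
      have hseg := greedy_seg lst pattern hl (j - i) i j rfl hj1 hj2 hjno
      by_cases hjn : j < lst.length
      · rw [dif_pos hjn]
        have hmat := hjmat hjn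
        have hbnd := matchAt_bound hl hmat
        rw [ih (lst.length - (j + pattern.length)) (by omega) (j + pattern.length) _ rfl
          (by omega)]
        rw [hslice, hseg, greedy_skip lst pattern hl j hjn hmat, List.append_assoc]
      · rw [dif_neg hjn]
        have hjeq : j = lst.length := by omega
        rw [ih 0 (by omega) lst.length _ (by omega) (le_refl _)]
        rw [hslice, hseg, hjeq]
        simp [List.drop_length, greedy]
    · rw [dif_neg h]
      have : i = lst.length := by omega
      subst this
      simp [List.drop_length, greedy]

theorem clear2_nil_pattern (lst : List Int) : clear2 lst [] = [] := by
  unfold clear2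
  simpa using clear2Loop_nil lst (List.range lst.length) []

theorem clear2_alt_nil_pattern (lst : List Int) : clear2_alt lst [] = lst := by
  unfold clear2_alt
  simp

theorem clear2_alt_eq_greedy (lst pattern : List Int) (hl : 0 < pattern.length) :
    clear2_alt lst pattern = greedy pattern hl lst := by
  unfold clear2_alt
  rw [dif_neg (by omega)]
  simpa using altLoop_eq lst pattern hl lst.length 0 [] rfl (by omega)



-- ===== VERDICT (by name: the statement is the Claim_ definition above) =====
theorem clear2_spec : Claim_unchanged_clear2 := by
  intro lst pattern _ hD
  by_cases hp : pattern = []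
  · subst hp
    have hlst : lst = [] := by
      by_contra hne
      exact hD ⟨rfl, hne⟩
    subst hlst
    rw [clear2_nil_pattern, clear2_alt_nil_pattern]
  · have hl : 0 < pattern.length := List.length_pos_of_ne_nil hp
    rw [clear2_eq_greedy lst pattern hl, clear2_alt_eq_greedy lst pattern hl]

theorem clear2_changed : Claim_changed_clear2 := by
  unfold Claim_changed_clear2
  refine ⟨by decide, ⟨rfl, by decide⟩, ?_, ?_, by decide⟩
  · exact clear2_nil_pattern [1]
  · exact clear2_alt_nil_pattern [1]

theorem clear2_tight : Claim_exact_clear2 := by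
  intro lst pattern _ hD
  obtain ⟨hp, hlst⟩ := hD
  subst hp
  rw [clear2_nil_pattern, clear2_alt_nil_pattern]
  exact fun h => hlst h.symm
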